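-- pv_equiv track=rewrite | github.com/MasonBush/advent | 09/part2.py | getFreeSpaces
-- ===== SOURCE A (Python) =====
-- def getFreeSpaces(blockedMap):
-- 	#dict[freespace size, starting index]
-- 	freeSpaces: dict[int, list[int]] = {}
-- 	index = 0
-- 	while True:
-- 		if index == len(blockedMap): break
--
-- 		if blockedMap[index] == None:
-- 			for i in range(index, len(blockedMap)):
-- 				if blockedMap[i] != None:
-- 					size = i - index
-- 					if size not in freeSpaces:
-- 						freeSpaces[size] = [index]
-- 					else:
-- 						freeSpaces[size].append(index)
--
-- 					index = i
-- 					break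
--
-- 		index += 1
--
-- 	return freeSpaces
-- ===== SOURCE B (Python) =====
-- def getFreeSpaces(blockedMap):
-- 	# One forward pass tracking the start of the current free run; no inner rescan.
-- 	freeSpaces = {}
-- 	start = None
-- 	for i, x in enumerate(blockedMap):
-- 		if x == None:
-- 			if start == None:
-- 				start = i
-- 		else:
-- 			if start != None:
-- 				freeSpaces.setdefault(i - start, []).append(start)
-- 				start = None
-- 	return freeSpaces
-- ===== Notes on version B (the rewrite author's own statement) =====
-- stated objective: simpler
-- what changed: Replaced A's while-loop, which on every free block re-scans forward with an inner for-loop to find the end of the run, by a single forward pass over enumerate(blockedMap) that tracks the start index of the current free run and records the run when the first non-None terminator appears (so a trailing unterminated run is naturally never recorded, as in A).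
import Mathlib
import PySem

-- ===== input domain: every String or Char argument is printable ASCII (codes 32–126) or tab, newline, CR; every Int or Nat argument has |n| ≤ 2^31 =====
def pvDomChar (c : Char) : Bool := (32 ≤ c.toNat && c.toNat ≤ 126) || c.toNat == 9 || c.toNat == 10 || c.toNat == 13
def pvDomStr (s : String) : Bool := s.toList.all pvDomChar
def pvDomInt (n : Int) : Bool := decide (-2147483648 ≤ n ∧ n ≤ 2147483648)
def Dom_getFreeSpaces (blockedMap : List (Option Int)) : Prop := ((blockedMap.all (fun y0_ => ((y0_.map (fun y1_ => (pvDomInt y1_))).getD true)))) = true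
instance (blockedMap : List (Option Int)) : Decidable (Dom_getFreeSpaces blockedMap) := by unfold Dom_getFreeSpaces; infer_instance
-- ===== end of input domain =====

-- B replaces A's rescanning while-loop (inner `for` re-finding the end of each free run)
-- by one forward pass over enumerate(blockedMap) that tracks the start of the current free
-- run; objective: simpler.

-- ===== PORT A =====
-- inner `for i in range(index, len(blockedMap)): if blockedMap[i] != None: … break`:
-- returns the first index ≥ index whose element is not None (none = loop fell through)
def findStopA (bm : List (Option Int)) (i : Nat) : Option Nat :=
  if h : i < bm.length then
    if (bm[i]).isSome then some i else findStopA bm (i + 1)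
  else none
termination_by bm.length - i

-- cited by loopA's decreasing_by
theorem findStopA_ge (bm : List (Option Int)) (i j : Nat) (h : findStopA bm i = some j) : i ≤ j := by
  fun_induction findStopA bm i with
  | case1 i hi hs => simp at h; omega
  | case2 i hi hs ih => have := ih h; omega
  | case3 i hi => simp at h

-- the dict update `if size not in freeSpaces: freeSpaces[size] = [index] else: freeSpaces[size].append(index)`
def updA (d : PySem.Dict Int (List Int)) (size : Int) (index : Int) : PySem.Dict Int (List Int) :=
  if d.contains size = false then d.insert size [index]
  else d.modify size [] (fun l => l ++ [index])

-- the `while True` loop over the mutable `index`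
def loopA (bm : List (Option Int)) (d : PySem.Dict Int (List Int)) (index : Nat) :
    PySem.Dict Int (List Int) :=
  if h : bm.length ≤ index then d
  else
    if (bm[index]'(by omega)).isNone then
      match hf : findStopA bm index with
      | some i => loopA bm (updA d ((i : Int) - (index : Int)) (index : Int)) (i + 1)
      | none => loopA bm d (index + 1)
    else loopA bm d (index + 1)
termination_by bm.length - index
decreasing_by
  · have := findStopA_ge bm index i hf; omega
  · omega
  · omega

def getFreeSpaces (blockedMap : List (Option Int)) : List (Int × List Int) :=
  (loopA blockedMap PySem.Dict.empty 0).items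

-- ===== PORT B =====
-- the body of Source B's `for i, x in enumerate(blockedMap)` loop, state = (freeSpaces, start)
def stepB (st : PySem.Dict Int (List Int) × Option Int) (p : Int × Option Int) :
    PySem.Dict Int (List Int) × Option Int :=
  match p.2 with
  | none =>
    match st.2 with
    | none => (st.1, some p.1)
    | some s => (st.1, some s)
  | some _ =>
    match st.2 with
    | some s => (st.1.modify (p.1 - s) [] (fun l => l ++ [s]), none)  -- setdefault(...,[]).append(start)
    | none => (st.1, none)

def getFreeSpaces_alt (blockedMap : List (Option Int)) : List (Int × List Int) :=
  (((PySem.List.enumerate blockedMap 0).foldl stepB (PySem.Dict.empty, none)).1).items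

-- ===== PRECONDITION & SPEC =====
def Spec_getFreeSpaces (blockedMap : List (Option Int)) (out : List (Int × List Int)) : Prop := out = getFreeSpaces_alt blockedMap
instance (blockedMap : List (Option Int)) (out : List (Int × List Int)) : Decidable (Spec_getFreeSpaces blockedMap out) := by unfold Spec_getFreeSpaces; infer_instance

-- ===== CLAIM (what is proved, stated in full; the proofs are below) =====
def Claim_equal_getFreeSpaces : Prop := ∀ (blockedMap : List (Option Int)), Dom_getFreeSpaces blockedMap → Spec_getFreeSpaces blockedMap (getFreeSpaces blockedMap)

-- ===== LEMMAS AND PROOFS =====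

-- findStopA found nothing: everything from i on is None
theorem findStopA_none_all (bm : List (Option Int)) (i : Nat) :
    findStopA bm i = none → ∀ k, i ≤ k → k < bm.length → bm[k]? = some none := by
  fun_induction findStopA bm i with
  | case1 i hi hs => intro h; simp at h
  | case2 i hi hs ih =>
    intro h k hk hkl
    rcases Nat.eq_or_lt_of_le hk with heq | hlt
    · subst heq
      have hnone : bm[i]'hi = none := Option.not_isSome_iff_eq_none.mp (by simpa using hs)
      rw [List.getElem?_eq_getElem hi, hnone]
    · exact ih h k (by omega) hkl
  | case3 i hi => intro _ k hk hkl; omega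

-- findStopA found j: j is in range, bm[j] is non-None, everything strictly between is None
theorem findStopA_some_spec (bm : List (Option Int)) (i j : Nat) :
    findStopA bm i = some j →
    j < bm.length ∧ bm[j]?.getD none ≠ none ∧ ∀ k, i ≤ k → k < j → bm[k]? = some none := by
  fun_induction findStopA bm i with
  | case1 i hi hs =>
    intro h
    obtain rfl : i = j := by simpa using h
    refine ⟨hi, ?_, fun k hk hkl => by omega⟩
    rw [List.getElem?_eq_getElem hi]
    simpa [Option.isSome_iff_ne_none] using hs
  | case2 i hi hs ih =>
    intro h
    obtain ⟨h1, h2, h3⟩ := ih h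
    have hij : i ≤ j := findStopA_ge bm (i + 1) j h |>.trans' (by omega)
    refine ⟨h1, h2, fun k hk hkl => ?_⟩
    rcases Nat.eq_or_lt_of_le hk with heq | hlt
    · subst heq
      have hnone : bm[i]'hi = none := Option.not_isSome_iff_eq_none.mp (by simpa using hs)
      rw [List.getElem?_eq_getElem hi, hnone]
    · exact h3 k (by omega) hkl
  | case3 i hi => intro h; simp at h

-- B's fold over an all-None run never touches the dict
theorem fold_none_fst (l : List (Option Int)) : ∀ (j : Int) (d : PySem.Dict Int (List Int))
    (st : Option Int), (∀ x ∈ l, x = none) →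
    (((PySem.List.enumerate l j).foldl stepB (d, st)).1 = d) := by
  induction l with
  | nil => intro j d st _; simp [PySem.List.enumerate_nil]
  | cons x xs ih =>
    intro j d st h
    obtain rfl : x = none := h x (by simp)
    rw [PySem.List.enumerate_cons]
    simp only [List.foldl_cons]
    cases st <;>
      · simp only [stepB]
        exact ih _ _ _ (fun y hy => h y (by simp [hy]))

-- B's fold across a free run that started at s: Nones up to position i keep the state,
-- the non-None at i records the run and resets the state
theorem fold_seg (bm : List (Option Int)) (i : Nat) (hi : i < bm.length)
    (hv : (bm[i]'hi).isSome) :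
    ∀ (n k : Nat) (d : PySem.Dict Int (List Int)) (s : Int), i - k = n → k ≤ i →
    (∀ m, k ≤ m → m < i → bm[m]? = some none) →
    (PySem.List.enumerate (bm.drop k) (k : Int)).foldl stepB (d, some s)
      = (PySem.List.enumerate (bm.drop (i + 1)) ((i : Int) + 1)).foldl stepB
          (d.modify ((i : Int) - s) [] (fun l => l ++ [s]), none) := by
  intro n
  induction n with
  | zero =>
    intro k d s h0 hki hmid
    obtain rfl : k = i := by omega
    rw [List.drop_eq_getElem_cons hi, PySem.List.enumerate_cons]
    obtain ⟨v, hv'⟩ := Option.isSome_iff_exists.mp hv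
    rw [hv']
    simp only [List.foldl_cons]
    rfl
  | succ n ih =>
    intro k d s h0 hki hmid
    have hk : k < i := by omega
    have hkl : k < bm.length := by omega
    have hknone : bm[k]'hkl = none := by
      have := hmid k (Nat.le_refl k) hk
      rw [List.getElem?_eq_getElem hkl] at this
      simpa using this
    rw [List.drop_eq_getElem_cons hkl, PySem.List.enumerate_cons, hknone]
    simp only [List.foldl_cons, stepB]
    have hc : (k : Int) + 1 = ((k + 1 : Nat) : Int) := by push_cast; ring
    rw [hc]
    exact ih (k + 1) d s (by omega) (by omega) (fun m hm hmi => hmid m (by omega) hmi)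

-- A's dict update is exactly Source B's setdefault-append
theorem updA_eq_modify (d : PySem.Dict Int (List Int)) (size index : Int) :
    updA d size index = d.modify size [] (fun l => l ++ [index]) := by
  by_cases hc : d.contains size
  · simp [updA, hc]
  · rw [updA, if_pos (by simpa using hc)]
    rw [show d.modify size [] (fun l => l ++ [index]) = d.insert size (d.getD size [] ++ [index]) by
      simp [PySem.Dict.modify, PySem.Dict.getD_eq_get?_getD]]
    rw [PySem.Dict.getD_of_not_contains d [] (by simpa using hc)]
    simp

theorem main_loop_eq (bm : List (Option Int)) : ∀ (index : Nat) (d : PySem.Dict Int (List Int)),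
    loopA bm d index =
      ((PySem.List.enumerate (bm.drop index) (index : Int)).foldl stepB (d, none)).1 := by
  intro index d
  fun_induction loopA bm d index with
  | case1 d index h =>
    rw [List.drop_eq_nil_of_le h]
    simp [PySem.List.enumerate_nil]
  | case2 d index h hnone i hf ih =>
    -- A records the run [index, i) and jumps to i + 1
    have hil : index < bm.length := by omega
    obtain ⟨h1, h2, h3⟩ := findStopA_some_spec bm index i hf
    have hge : index ≤ i := findStopA_ge bm index i hf
    have hbi : bm[index]'hil = none := Option.isNone_iff_eq_none.mp hnone
    have hlt : index < i := by
      rcases Nat.eq_or_lt_of_le hge with rfl | h' 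
      · exfalso; apply h2; rw [List.getElem?_eq_getElem h1]; simpa using hbi
      · exact h'
    rw [List.drop_eq_getElem_cons hil, PySem.List.enumerate_cons, hbi]
    simp only [List.foldl_cons, stepB]
    have hc : (index : Int) + 1 = ((index + 1 : Nat) : Int) := by push_cast; ring
    rw [hc, fold_seg bm i h1 (by
        rw [List.getElem?_eq_getElem h1] at h2
        simpa [Option.isSome_iff_ne_none] using h2)
      (i - (index + 1)) (index + 1) d (index : Int) rfl (by omega)
      (fun m hm hmi => h3 m (by omega) hmi)]
    rw [ih, updA_eq_modify]
    norm_cast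
  | case3 d index h hnone hf ih =>
    -- no terminator: everything from index on is None; neither side records anything
    have hall := findStopA_none_all bm index hf
    have hdrop : ∀ k, ∀ x ∈ bm.drop k, index ≤ k → x = none := by
      intro k x hx hk
      obtain ⟨t, ht, hxt⟩ := List.getElem_of_mem hx
      have ht' : k + t < bm.length := by simp only [List.length_drop] at ht; omega
      rw [List.getElem_drop] at hxt
      have := hall (k + t) (by omega) ht'
      rw [List.getElem?_eq_getElem ht'] at this
      simp only [Option.some.injEq] at this
      rw [← hxt]; exact this
    rw [ih]
    rw [fold_none_fst (bm.drop (index + 1)) _ d none (fun x hx => hdrop (index + 1) x hx (by omega))]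
    rw [fold_none_fst (bm.drop index) _ d none (fun x hx => hdrop index x hx (le_refl _))]
  | case4 d index h hsome ih =>
    have hil : index < bm.length := by omega
    obtain ⟨v, hv⟩ := Option.ne_none_iff_exists'.mp
      (fun he => hsome (by simp [he]) : bm[index]'(by omega) ≠ none)
    rw [List.drop_eq_getElem_cons hil, PySem.List.enumerate_cons, hv]
    simp only [List.foldl_cons, stepB]
    have hc : (index : Int) + 1 = ((index + 1 : Nat) : Int) := by push_cast; ring
    rw [hc]
    exact ih

-- ===== VERDICT (by name: the statement is the Claim_ definition above) =====
theorem getFreeSpaces_spec : Claim_equal_getFreeSpaces := by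
  intro bm _
  unfold Spec_getFreeSpaces getFreeSpaces getFreeSpaces_alt
  have h := main_loop_eq bm 0 PySem.Dict.empty
  simp only [List.drop_zero, Int.natCast_zero] at h
  exact congrArg PySem.Dict.items h
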